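-- pv_equiv track=rewrite | github.com/twobackfromtheend/quRL | quantum_evolution/utils/protocol_utils.py | get_h_list
-- ===== SOURCE A (Python) =====
-- from typing import Sequence, Callable, Any, List
--
-- def get_h_list(protocol: Sequence[int]) -> Sequence[int]:
--     """
--     Gets a list of h_x's for the given protocol.
--     :param protocol:
--     :return:
--     """
--     h_list = []
--     current_h_x = -4
--
--     for i in range(len(protocol)):
--         if protocol[i] == 1:
--             current_h_x *= -1
--         h_list.append(current_h_x)
--
--     return h_list
-- ===== SOURCE B (Python) =====
-- def get_h_list(protocol):
--     protocol = list(protocol)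
--     try:
--         i = protocol.index(1)
--     except ValueError:
--         return [-4] * len(protocol)
--     return [-4] * i + [4] + [-x for x in get_h_list(protocol[i + 1:])]
-- ===== Notes on version B (the rewrite author's own statement) =====
-- stated objective: alternative
-- what changed: Replaces A's single stateful scan with a toggling sign by a divide-and-conquer recursion: locate the first 1 with list.index, emit a constant -4 block up to it, a 4 at it, and the sign-negated recursive result of the suffix; no per-element sign state is carried.
import Mathlib
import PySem

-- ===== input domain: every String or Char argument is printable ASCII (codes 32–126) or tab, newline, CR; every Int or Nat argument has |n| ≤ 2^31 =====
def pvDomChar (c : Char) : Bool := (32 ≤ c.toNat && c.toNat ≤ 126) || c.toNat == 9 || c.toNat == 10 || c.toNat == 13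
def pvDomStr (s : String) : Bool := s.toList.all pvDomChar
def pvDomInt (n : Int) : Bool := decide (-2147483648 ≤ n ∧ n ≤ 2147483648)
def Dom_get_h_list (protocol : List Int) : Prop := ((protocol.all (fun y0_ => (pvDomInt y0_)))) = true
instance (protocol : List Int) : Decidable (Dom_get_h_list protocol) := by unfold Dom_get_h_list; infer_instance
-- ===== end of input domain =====

-- B replaces A's single sign-toggling scan with a divide-and-conquer recursion on the position of the first 1 (constant block, toggle, negated recursive suffix); objective: alternative decomposition, same cost.


-- ===== PORT A =====
-- A: loop over indices with a toggling sign, appending to h_list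
def get_h_list (protocol : List Int) : List Int :=
  (protocol.foldl
    (fun (st : List Int × Int) p =>
      let cur := if p == 1 then st.2 * (-1) else st.2
      (st.1 ++ [cur], cur))
    ([], -4)).1

-- ===== PORT B =====
-- B: find the first 1 (list.index / ValueError branch); constant -4 block, a 4, then the negated recursive result of the suffix
def get_h_list_alt (protocol : List Int) : List Int :=
  match h : PySem.List.index? protocol 1 with
  | none => List.replicate protocol.length (-4)
  | some i =>
      List.replicate i (-4) ++ [4] ++ (get_h_list_alt (protocol.drop (i + 1))).map (fun x => -x)
termination_by protocol.length
decreasing_by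
  simp only [List.length_drop]
  have : (1 : Int) ∈ protocol := (PySem.List.index?_isSome_iff protocol 1).mp (by rw [h]; rfl)
  have : 0 < protocol.length := List.length_pos_of_mem this
  omega

-- ===== PRECONDITION & SPEC =====
def Spec_get_h_list (protocol : List Int) (out : List Int) : Prop := out = get_h_list_alt protocol
instance (protocol : List Int) (out : List Int) : Decidable (Spec_get_h_list protocol out) := by unfold Spec_get_h_list; infer_instance

-- ===== CLAIM (what is proved, stated in full; the proofs are below) =====
def Claim_equal_get_h_list : Prop := ∀ (protocol : List Int), Dom_get_h_list protocol → Spec_get_h_list protocol (get_h_list protocol)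

-- ===== LEMMAS AND PROOFS =====

-- A's fold from an arbitrary state, with the produced list factored out
def pvBody (s : Int) : List Int → List Int
  | [] => []
  | p :: ps => let c := if p == 1 then s * (-1) else s; c :: pvBody c ps

theorem pv_fold_eq_body (ps : List Int) (acc : List Int) (s : Int) :
    (ps.foldl
      (fun (st : List Int × Int) p =>
        let cur := if p == 1 then st.2 * (-1) else st.2
        (st.1 ++ [cur], cur))
      (acc, s)).1 = acc ++ pvBody s ps := by
  induction ps generalizing acc s with
  | nil => simp [pvBody]
  | cons p ps ih =>
    simp only [List.foldl_cons]
    rw [ih]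
    simp [pvBody]

theorem pv_body_neg (ps : List Int) (s : Int) :
    pvBody (-s) ps = (pvBody s ps).map (fun x => -x) := by
  induction ps generalizing s with
  | nil => simp [pvBody]
  | cons p ps ih =>
    by_cases hp : p = 1 <;>
      simp [pvBody, hp, ← ih]

theorem pv_body_no_one (ps : List Int) (s : Int) (h : (1 : Int) ∉ ps) :
    pvBody s ps = List.replicate ps.length s := by
  induction ps with
  | nil => simp [pvBody]
  | cons p ps ih =>
    have hp : p ≠ 1 := fun hp => h (hp ▸ List.mem_cons_self)
    simp [pvBody, hp, List.replicate_succ, ih (fun hm => h (List.mem_cons_of_mem _ hm))]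

theorem pv_body_split (pre suf : List Int) (s : Int) (h : (1 : Int) ∉ pre) :
    pvBody s (pre ++ 1 :: suf) =
      List.replicate pre.length s ++ (s * (-1)) :: pvBody (s * (-1)) suf := by
  induction pre generalizing s with
  | nil => simp [pvBody]
  | cons p ps ih =>
    have hp : p ≠ 1 := fun hp => h (hp ▸ List.mem_cons_self)
    simp [pvBody, hp, List.replicate_succ, ih s (fun hm => h (List.mem_cons_of_mem _ hm))]

theorem pv_body_eq_alt (ps : List Int) : pvBody (-4) ps = get_h_list_alt ps := by
  induction hn : ps.length using Nat.strong_induction_on generalizing ps with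
  | _ n ih =>
    rw [get_h_list_alt]
    split
    · next h =>
      have : (1 : Int) ∉ ps := (PySem.List.index?_eq_none_iff ps 1).mp h
      simp [pv_body_no_one ps _ this]
    · next i h =>
      obtain ⟨pre, suf, hps, hlen, hnot⟩ := (PySem.List.index?_eq_some_iff ps 1 i).mp h
      subst hps
      rw [pv_body_split pre suf _ hnot]
      have hdrop : (pre ++ 1 :: suf).drop (i + 1) = suf := by
        subst hlen
        simp [List.drop_append]
      have hrec : pvBody (-4) suf = get_h_list_alt suf := by
        apply ih suf.length _ suf rfl
        subst hn hlen
        simp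
        omega
      have hneg : pvBody (4 : Int) suf = (pvBody (-4) suf).map (fun x => -x) := by
        have h := pv_body_neg suf (-4)
        norm_num at h
        exact h
      rw [hdrop, ← hlen]
      simp only [show ((-4 : Int) * (-1)) = 4 by ring, hneg, hrec]
      simp

-- ===== VERDICT (by name: the statement is the Claim_ definition above) =====
theorem get_h_list_spec : Claim_equal_get_h_list := by
  intro protocol _
  unfold Spec_get_h_list get_h_list
  rw [pv_fold_eq_body, ← pv_body_eq_alt]
  simp
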